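-- pv_equiv track=rewrite | github.com/lvisser-code/emu80 | emu80.py | command_list
-- ===== SOURCE A (Python) =====
-- def command_list(command):
--     """"Make a list with upper case command + optional parameters"""
--     list = command.split()
--     if len(list) == 0:
--         list.append('')
--     for i in range (len(list)):
--         if i==1 and list[0]== 'L': # Don't change case of LOAD parameter (file name)
--             pass
--         else:
--             list[i] = list[i].upper()
--     return list
-- ===== SOURCE B (Python) =====
-- def command_list(command):
--     """"Make a list with upper case command + optional parameters"""
--     words = command.upper().split()
--     if not words:
--         return ['']
--     if words[0] == 'L' and len(words) > 1:
--         words[1] = command.split()[1]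
--     return words
-- ===== Notes on version B (the rewrite author's own statement) =====
-- stated objective: simpler
-- what changed: Eliminates the per-token uppercase loop entirely: B uppercases the whole command string once before splitting (upper commutes with whitespace splitting), then restores the original second token from a fresh split when the first word is 'L'.
import Mathlib
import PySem

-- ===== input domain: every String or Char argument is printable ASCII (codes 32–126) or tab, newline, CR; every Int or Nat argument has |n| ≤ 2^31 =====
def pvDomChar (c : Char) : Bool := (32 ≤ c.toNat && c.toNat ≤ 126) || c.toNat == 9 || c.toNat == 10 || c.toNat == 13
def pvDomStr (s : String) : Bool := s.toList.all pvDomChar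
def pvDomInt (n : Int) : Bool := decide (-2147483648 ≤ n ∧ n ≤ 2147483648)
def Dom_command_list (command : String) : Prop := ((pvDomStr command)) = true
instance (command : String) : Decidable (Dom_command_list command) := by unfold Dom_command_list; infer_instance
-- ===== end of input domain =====

-- B uppercases the WHOLE command string once before splitting (no per-token loop),
-- then restores the original second token when the first word is 'L'; same values as A.

-- ===== PORT A =====
-- A's loop body: at index i, skip if i==1 and current list[0]=='L', else uppercase in place
def pvAStep (l : List String) (i : Nat) : List String :=
  if i == 1 && l.getD 0 "" == "L" then l
  else l.set i (PySem.Str.upper (l.getD i ""))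

def command_list (command : String) : List String :=
  let lst := PySem.Str.split₀ command
  let lst := if lst.length == 0 then lst ++ [""] else lst
  (List.range lst.length).foldl pvAStep lst

-- ===== PORT B =====
def command_list_alt (command : String) : List String :=
  let words := PySem.Str.split₀ (PySem.Str.upper command)
  if words.length == 0 then [""]
  else if words.getD 0 "" == "L" && decide (words.length > 1) then
    -- words[1] = command.split()[1]; in range because the guard gives len(words) > 1
    words.set 1 ((PySem.Str.split₀ command).getD 1 "")
  else words

-- ===== PRECONDITION & SPEC =====
def Spec_command_list (command : String) (out : List String) : Prop := out = command_list_alt command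
instance (command : String) (out : List String) : Decidable (Spec_command_list command out) := by unfold Spec_command_list; infer_instance

-- ===== CLAIM (what is proved, stated in full; the proofs are below) =====
def Claim_equal_command_list : Prop := ∀ (command : String), Dom_command_list command → Spec_command_list command (command_list command)

-- ===== LEMMAS AND PROOFS =====

-- upperChar never moves a character into or out of the whitespace class
theorem pvUpperChar_isspace (c : Char) :
    PySem.Chars.isspace (PySem.Chars.upperChar c) = PySem.Chars.isspace c := by
  by_cases h : PySem.Chars.islower c = true
  · have hc : 97 ≤ c.toNat ∧ c.toNat ≤ 122 := by
      simp [PySem.Chars.islower, Char.le_def] at h; exact ⟨h.1, h.2⟩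
    have hv : (c.toNat - 32).isValidChar := Or.inl (by omega)
    have htoNat : (Char.ofNat (c.toNat - 32)).toNat = c.toNat - 32 := by
      rw [Char.ofNat, dif_pos hv]; rfl
    simp [PySem.Chars.upperChar, h, PySem.Chars.isspace, htoNat]
    rw [Bool.eq_iff_iff]
    simp only [Bool.or_eq_true, Bool.and_eq_true, decide_eq_true_eq]
    omega
  · simp [PySem.Chars.upperChar, h]

-- split₀.go commutes with a character map that preserves whitespace (applied to upperChar)
theorem pvSplitGo_upper : ∀ (s cur : List Char) (acc : List (List Char)),
    PySem.Chars.split₀.go (s.map PySem.Chars.upperChar) (cur.map PySem.Chars.upperChar)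
        (acc.map (List.map PySem.Chars.upperChar))
      = (PySem.Chars.split₀.go s cur acc).map (List.map PySem.Chars.upperChar) := by
  intro s
  induction s with
  | nil =>
    intro cur acc
    simp only [List.map_nil, PySem.Chars.split₀.go]
    by_cases hc : cur.isEmpty
    · simp [hc]
    · simp [hc, List.isEmpty_map]
  | cons c rest ih =>
    intro cur acc
    simp only [List.map_cons, PySem.Chars.split₀.go]
    rw [pvUpperChar_isspace]
    by_cases hs : PySem.Chars.isspace c
    · by_cases hc : cur.isEmpty
      · simpa [hs, hc, List.isEmpty_map] using ih [] acc
      · simpa [hs, hc, List.isEmpty_map] using ih [] (cur.reverse :: acc)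
    · simpa [hs] using ih (c :: cur) acc

theorem pvCharsSplit_upper (cs : List Char) :
    PySem.Chars.split₀ (PySem.Chars.upper cs)
      = (PySem.Chars.split₀ cs).map PySem.Chars.upper := by
  show PySem.Chars.split₀.go (cs.map PySem.Chars.upperChar) [] []
    = (PySem.Chars.split₀.go cs [] []).map PySem.Chars.upper
  have := pvSplitGo_upper cs [] []
  simpa [PySem.Chars.upper] using this

-- uppercasing the whole string then splitting = splitting then uppercasing each token
theorem pvSplit_upper (s : String) :
    PySem.Str.split₀ (PySem.Str.upper s) = (PySem.Str.split₀ s).map PySem.Str.upper := by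
  have hinj : Function.Injective String.toList := fun a b h => String.toList_inj.mp h
  apply List.map_injective_iff.mpr hinj
  rw [PySem.Str.split₀_map_toList, PySem.Str.toList_upper, pvCharsSplit_upper,
    ← PySem.Str.split₀_map_toList, List.map_map, List.map_map]
  congr 1
  funext t
  simp [Function.comp, PySem.Str.toList_upper]

-- from index ≥ 2 on, A's loop is a plain in-place uppercase of the remaining suffix
theorem pvAStep_tail (post : List String) : ∀ (pre : List String), 2 ≤ pre.length →
    (List.range' pre.length post.length).foldl pvAStep (pre ++ post)
      = pre ++ post.map PySem.Str.upper := by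
  induction post with
  | nil => intro pre _; simp
  | cons p rest ih =>
    intro pre hpre
    have hset : (pre ++ p :: rest).set pre.length (PySem.Str.upper p)
        = (pre ++ [PySem.Str.upper p]) ++ rest := by
      rw [List.set_append_right _ _ (Nat.le_refl pre.length)]
      simp
    have hcond : (pre.length == 1) = false := by
      simp; omega
    have hstep : pvAStep (pre ++ p :: rest) pre.length
        = (pre ++ [PySem.Str.upper p]) ++ rest := by
      simp [pvAStep, hcond, hset]
    have ihh := ih (pre ++ [PySem.Str.upper p]) (by simp; omega)
    rw [List.length_cons, List.range'_succ, List.foldl_cons, hstep]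
    rw [show pre.length + 1 = (pre ++ [PySem.Str.upper p]).length by simp]
    rw [ihh]
    simp

theorem loopA (t0 t1 : String) (rest : List String) :
    (List.range (t0 :: t1 :: rest).length).foldl pvAStep (t0 :: t1 :: rest)
      = PySem.Str.upper t0
        :: (if PySem.Str.upper t0 = "L" then t1 else PySem.Str.upper t1)
        :: rest.map PySem.Str.upper := by
  rw [List.range_eq_range', List.length_cons, List.length_cons,
    List.range'_succ, List.range'_succ, List.foldl_cons, List.foldl_cons]
  have h0 : pvAStep (t0 :: t1 :: rest) 0 = PySem.Str.upper t0 :: t1 :: rest := by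
    simp [pvAStep, List.getD]
  rw [h0]
  by_cases hL : PySem.Str.upper t0 = "L"
  · have h1 : pvAStep (PySem.Str.upper t0 :: t1 :: rest) 1
        = PySem.Str.upper t0 :: t1 :: rest := by
      simp [pvAStep, List.getD, hL]
    rw [h1]
    have := pvAStep_tail rest [PySem.Str.upper t0, t1] (by simp)
    simpa [hL] using this
  · have h1 : pvAStep (PySem.Str.upper t0 :: t1 :: rest) 1
        = PySem.Str.upper t0 :: PySem.Str.upper t1 :: rest := by
      simp [pvAStep, List.getD, hL]
    rw [h1]
    have := pvAStep_tail rest [PySem.Str.upper t0, PySem.Str.upper t1] (by simp)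
    simpa [hL] using this

theorem command_list_eq_alt (command : String) :
    command_list command = command_list_alt command := by
  unfold command_list command_list_alt
  rw [pvSplit_upper]
  cases h : PySem.Str.split₀ command with
  | nil => simp [List.range]; decide
  | cons t0 ts =>
    cases ts with
    | nil =>
      simp [pvAStep, List.range_succ, List.getD]
    | cons t1 rest =>
      have h2 : ∀ n : Nat, (n + 1 + 1 == 0) = false := fun n => by simp
      simp only [List.map_cons, List.length_cons, List.getD_cons_zero, h2,
        Bool.false_eq_true, if_false]
      rw [show rest.length + 1 + 1 = (t0 :: t1 :: rest).length from by simp, loopA]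
      by_cases hL : PySem.Str.upper t0 = "L"
      · simp [hL]
      · simp [hL]

-- ===== VERDICT (by name: the statement is the Claim_ definition above) =====
theorem command_list_spec : Claim_equal_command_list := by
  intro command _
  unfold Spec_command_list
  exact command_list_eq_alt command
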